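-- pv_equiv track=rewrite | github.com/mrigankpawagi/ProbeableProblems | code/q2/buggy/11_2.py | first_positive_integer
-- ===== SOURCE A (Python) =====
-- def first_positive_integer(s):
--     num = ''
--
--     for char in s:
--         if char.isdigit():
--             num += char
--             if num != '0' and int(num) > 0:
--                 return int(num)
--         else:
--             if num != '':
--                 break
--
--     return 0
-- ===== SOURCE B (Python) =====
-- def first_positive_integer(s):
--     # Phase 1: skip to the first digit; Phase 2: within that digit run,
--     # return the first nonzero digit's value; otherwise 0.
--     i = 0
--     n = len(s)
--     while i < n and not s[i].isdigit():
--         i += 1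
--     while i < n and s[i].isdigit():
--         if s[i] != '0':
--             return int(s[i])
--         i += 1
--     return 0
-- ===== Notes on version B (the rewrite author's own statement) =====
-- stated objective: simpler
-- what changed: B replaces A's single loop that accumulates a growing digit string and reparses it with int() at every digit by a two-phase pointer scan (skip to the first digit run, then return the first nonzero digit's value), never building or parsing a string.
import Mathlib
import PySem

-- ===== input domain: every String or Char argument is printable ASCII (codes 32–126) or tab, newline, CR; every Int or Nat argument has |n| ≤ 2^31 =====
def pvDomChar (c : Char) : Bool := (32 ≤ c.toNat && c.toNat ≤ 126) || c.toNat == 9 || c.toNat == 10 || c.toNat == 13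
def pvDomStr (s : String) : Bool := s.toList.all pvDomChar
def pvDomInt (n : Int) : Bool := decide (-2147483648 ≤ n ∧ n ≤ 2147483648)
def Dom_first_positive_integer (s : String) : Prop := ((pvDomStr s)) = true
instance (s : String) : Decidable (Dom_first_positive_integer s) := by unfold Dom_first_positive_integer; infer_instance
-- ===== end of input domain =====

-- B replaces A's accumulate-and-reparse digit-string loop by a two-phase scan
-- (skip to the first digit run, return the first nonzero digit's value); objective: simpler.

-- ===== PORT A =====
-- A's loop: `num` is the accumulated digit string; on a digit, append it and return
-- int(num) if `num != '0' and int(num) > 0`; on a non-digit, break (return 0) if num ≠ ''.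
-- int(num) is only evaluated on nonempty all-digit `num`, where Python's int returns
-- (PySem.Int.ofChars? never `none` there), so `.getD 0` is exact.
def fpiLoopA : List Char → List Char → Int
  | [], _ => 0
  | c :: rest, num =>
    if PySem.Chars.isdigit c then
      let num' := num ++ [c]
      if num' ≠ ['0'] ∧ 0 < (PySem.Int.ofChars? num').getD 0 then (PySem.Int.ofChars? num').getD 0
      else fpiLoopA rest num'
    else
      if num ≠ [] then 0
      else fpiLoopA rest num

def first_positive_integer (s : String) : Int := fpiLoopA s.toList []

-- ===== PORT B =====
-- second while loop of Source B: inside the digit run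
def fpiScanB : List Char → Int
  | [] => 0
  | c :: rest =>
    if PySem.Chars.isdigit c then
      if c ≠ '0' then (PySem.Int.ofChars? [c]).getD 0 else fpiScanB rest
    else 0

-- first while loop of Source B: skip non-digits
def fpiSkipB : List Char → Int
  | [] => 0
  | c :: rest => if ¬ PySem.Chars.isdigit c then fpiSkipB rest else fpiScanB (c :: rest)

def first_positive_integer_alt (s : String) : Int := fpiSkipB s.toList

-- ===== PRECONDITION & SPEC =====
def Spec_first_positive_integer (s : String) (out : Int) : Prop := out = first_positive_integer_alt s
instance (s : String) (out : Int) : Decidable (Spec_first_positive_integer s out) := by unfold Spec_first_positive_integer; infer_instance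

-- ===== CLAIM (what is proved, stated in full; the proofs are below) =====
def Claim_equal_first_positive_integer : Prop := ∀ (s : String), Dom_first_positive_integer s → Spec_first_positive_integer s (first_positive_integer s)

-- ===== LEMMAS AND PROOFS =====

lemma digit_toNat (c : Char) (h : PySem.Chars.isdigit c = true) : 48 ≤ c.toNat ∧ c.toNat ≤ 57 := by
  simp [PySem.Chars.isdigit, Char.le_def, UInt32.le_iff_toNat_le] at h
  exact h

lemma digit_not_space (c : Char) (h : PySem.Chars.isdigit c = true) : PySem.Int.isIntSpace c = false := by
  have hb := digit_toNat c h
  simp [PySem.Int.isIntSpace]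
  refine ⟨⟨⟨⟨⟨?_,?_⟩,?_⟩,?_⟩,?_⟩,?_⟩ <;> rintro rfl <;> simp_all

lemma char_eq_of_toNat_eq (c d : Char) (h : c.toNat = d.toNat) : c = d :=
  Char.ext (UInt32.toNat_inj.mp h)

lemma digit_cases (c : Char) (h : PySem.Chars.isdigit c = true) :
    c = '0' ∨ c = '1' ∨ c = '2' ∨ c = '3' ∨ c = '4' ∨ c = '5' ∨ c = '6' ∨ c = '7' ∨ c = '8' ∨ c = '9' := by
  obtain ⟨hlo, hhi⟩ := digit_toNat c h
  interval_cases hn : c.toNat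
  · exact Or.inl (char_eq_of_toNat_eq c '0' hn)
  · exact Or.inr (Or.inl (char_eq_of_toNat_eq c '1' hn))
  · exact Or.inr (Or.inr (Or.inl (char_eq_of_toNat_eq c '2' hn)))
  · exact Or.inr (Or.inr (Or.inr (Or.inl (char_eq_of_toNat_eq c '3' hn))))
  · exact Or.inr (Or.inr (Or.inr (Or.inr (Or.inl (char_eq_of_toNat_eq c '4' hn)))))
  · exact Or.inr (Or.inr (Or.inr (Or.inr (Or.inr (Or.inl (char_eq_of_toNat_eq c '5' hn))))))
  · exact Or.inr (Or.inr (Or.inr (Or.inr (Or.inr (Or.inr (Or.inl (char_eq_of_toNat_eq c '6' hn)))))))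
  · exact Or.inr (Or.inr (Or.inr (Or.inr (Or.inr (Or.inr (Or.inr (Or.inl (char_eq_of_toNat_eq c '7' hn))))))))
  · exact Or.inr (Or.inr (Or.inr (Or.inr (Or.inr (Or.inr (Or.inr (Or.inr (Or.inl (char_eq_of_toNat_eq c '8' hn)))))))))
  · exact Or.inr (Or.inr (Or.inr (Or.inr (Or.inr (Or.inr (Or.inr (Or.inr (Or.inr (char_eq_of_toNat_eq c '9' hn)))))))))

lemma strip_digits (l : List Char) (h : ∀ c ∈ l, PySem.Chars.isdigit c = true) :
    (List.dropWhile PySem.Int.isIntSpace (List.dropWhile PySem.Int.isIntSpace l).reverse).reverse = l := by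
  have h1 : List.dropWhile PySem.Int.isIntSpace l = l := by
    cases l with
    | nil => rfl
    | cons a as => rw [List.dropWhile_cons_of_neg]; simp [digit_not_space a (h a (by simp))]
  rw [h1]
  have h2 : List.dropWhile PySem.Int.isIntSpace l.reverse = l.reverse := by
    cases hr : l.reverse with
    | nil => rfl
    | cons a as =>
      rw [List.dropWhile_cons_of_neg]
      have ha : a ∈ l := by rw [← List.mem_reverse, hr]; simp
      simp [digit_not_space a (h a ha)]
  rw [h2, List.reverse_reverse]

-- prepending a '0' to a nonempty all-digit string does not change int()
lemma ofChars?_cons_zero (ds : List Char) (hne : ds ≠ []) (hd : ∀ c ∈ ds, PySem.Chars.isdigit c = true) :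
    PySem.Int.ofChars? ('0' :: ds) = PySem.Int.ofChars? ds := by
  cases ds with
  | nil => exact absurd rfl hne
  | cons d rest =>
    have h1 : ∀ c ∈ ('0' :: d :: rest), PySem.Chars.isdigit c = true := by
      intro c hc
      rcases List.mem_cons.mp hc with rfl | hc
      · decide
      · exact hd c hc
    have h2 : ∀ c ∈ (d :: rest), PySem.Chars.isdigit c = true := by
      intro x hx; exact h1 x (List.mem_cons_of_mem _ hx)
    rcases digit_cases d (hd d (by simp)) with rfl|rfl|rfl|rfl|rfl|rfl|rfl|rfl|rfl|rfl <;>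
      (simp only [PySem.Int.ofChars?, strip_digits _ h1, strip_digits _ h2]; rfl)

lemma ofChars?_single_digit (c : Char) (h : PySem.Chars.isdigit c = true) :
    PySem.Int.ofChars? [c] = some ((c.toNat - 48 : Nat) : Int) := by
  rcases digit_cases c h with rfl|rfl|rfl|rfl|rfl|rfl|rfl|rfl|rfl|rfl <;> decide

lemma ofChars?_zeros_digit (k : Nat) (c : Char) (h : PySem.Chars.isdigit c = true) :
    PySem.Int.ofChars? (List.replicate k '0' ++ [c]) = some ((c.toNat - 48 : Nat) : Int) := by
  induction k with
  | zero => simpa using ofChars?_single_digit c h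
  | succ n ih =>
    rw [List.replicate_succ, List.cons_append, ofChars?_cons_zero _ (by simp) ?_]
    · exact ih
    · intro x hx
      simp only [List.mem_append, List.mem_replicate, List.mem_singleton] at hx
      rcases hx with ⟨_, rfl⟩ | rfl
      · decide
      · exact h

lemma replicate_append_ne_zero (k : Nat) (c : Char) :
    List.replicate (k+1) '0' ++ [c] ≠ ['0'] := by
  intro h
  have := congrArg List.length h
  simp at this

lemma digit_val_pos (c : Char) (h : PySem.Chars.isdigit c = true) (hz : c ≠ '0') :
    0 < ((c.toNat - 48 : Nat) : Int) := by
  have hb := digit_toNat c h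
  have h48 : c.toNat ≠ 48 := fun e => hz (char_eq_of_toNat_eq c '0' e)
  omega

-- inside the first digit run (num is a nonempty run of zeros), A's loop is B's scan
lemma loopA_zeros_eq_scan (cs : List Char) (k : Nat) :
    fpiLoopA cs (List.replicate (k+1) '0') = fpiScanB cs := by
  induction cs generalizing k with
  | nil => simp [fpiLoopA, fpiScanB]
  | cons c rest ih =>
    by_cases hd : PySem.Chars.isdigit c = true
    · have hv := ofChars?_zeros_digit (k+1) c hd
      by_cases hz : c = '0'
      · subst hz
        simp only [fpiLoopA, fpiScanB, hd, if_true, hv, Option.getD_some]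
        rw [if_neg (by rintro ⟨-, hlt⟩; revert hlt; decide),
          if_neg (by simp),
          show List.replicate (k+1) '0' ++ ['0'] = List.replicate (k+2) '0' from
            (List.replicate_succ' ..).symm]
        exact ih (k+1)
      · have hpos := digit_val_pos c hd hz
        simp only [fpiLoopA, fpiScanB, hd, if_true, hv, Option.getD_some]
        rw [if_pos ⟨replicate_append_ne_zero k c, hpos⟩, if_pos hz,
          ofChars?_single_digit c hd, Option.getD_some]
    · simp [fpiLoopA, fpiScanB, hd]

lemma loopA_nil_eq_skip (cs : List Char) : fpiLoopA cs [] = fpiSkipB cs := by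
  induction cs with
  | nil => simp [fpiLoopA, fpiSkipB]
  | cons c rest ih =>
    by_cases hd : PySem.Chars.isdigit c = true
    · simp only [fpiLoopA, fpiSkipB, fpiScanB, hd, if_true, List.nil_append, not_true, if_false]
      by_cases hz : c = '0'
      · subst hz
        rw [if_neg (by rintro ⟨hne, -⟩; exact hne rfl), if_neg (by simp)]
        have : [('0' : Char)] = List.replicate 1 '0' := rfl
        rw [this, loopA_zeros_eq_scan rest 0]
      · rw [if_pos ⟨by simpa using hz, by
            rw [ofChars?_single_digit c hd, Option.getD_some]; exact digit_val_pos c hd hz⟩,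
          if_pos hz]
    · simp only [fpiLoopA, fpiSkipB, hd]
      rw [if_neg (by simp)]
      exact ih

-- ===== VERDICT (by name: the statement is the Claim_ definition above) =====
theorem first_positive_integer_spec : Claim_equal_first_positive_integer := by
  intro s _
  show first_positive_integer s = first_positive_integer_alt s
  unfold first_positive_integer first_positive_integer_alt
  exact loopA_nil_eq_skip s.toList
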